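-- pv_equiv track=rewrite | github.com/1749352844/digital_match | answer.py | get_high_score_v2
-- ===== SOURCE A (Python) =====
-- def get_high_score_v2(desk, mine):
--     """获取最高分2.0 -- 无需对数组做排序，遍历查+1数值"""
--
--     # 结果集初始化
--     result, score = [], 0
--     # 获取编排后的数组 & 最高分
--     for i in desk:
--         eq_val, min_val, rel_val = loop_value(mine=mine, num=i+1)
--         # 结果值非空则分数+1，否则追加最小值
--         if rel_val is not None:
--             result.append(rel_val)
--             mine.remove(rel_val)
--             score += 1
--         else:
--             result.append(min_val)
--             mine.remove(min_val)
--     return result, score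
--
-- def loop_value(mine, num):
--     """遍历取值"""
--     # 初始化 -- 匹配值 & 最小值 & 结果值
--     eq_val, min_val, rel_val = num, mine[0], None
--     for item in mine:
--         # 遍历到匹配值则中断循环
--         if item == eq_val:
--             rel_val = item
--             break
--         # 遍历到大于匹配值的则替换
--         elif item > eq_val:
--             if rel_val is None:
--                 rel_val = item
--             elif item < rel_val:
--                 rel_val = item
--         # 更新最小值(结果值为空，则使用最小值)
--         if item < min_val:
--             min_val = item
--     return eq_val, min_val, rel_val
-- ===== SOURCE B (Python) =====
-- def get_high_score_v2(desk, mine):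
--     """Sort the pool once, then for each desk value take the first pool element
--     >= desk+1 (the smallest such, since the pool is sorted), else the pool's head
--     (its minimum). Return-value equivalent to A; does not mutate `mine`."""
--     pool = sorted(mine)
--     result = []
--     score = 0
--     for i in desk:
--         target = i + 1
--         k = 0
--         while k < len(pool) and pool[k] < target:
--             k += 1
--         if k < len(pool):
--             result.append(pool.pop(k))
--             score += 1
--         else:
--             result.append(pool.pop(0))
--     return result, score
-- ===== Notes on version B (the rewrite author's own statement) =====
-- stated objective: alternative
-- what changed: B sorts the pool once and then takes the first element >= desk+1 by a single forward scan (early exit) with positional pops, instead of A's per-item full scan of the unsorted list tracking match/min-greater/min simultaneously; equivalence is about the return value only (A empties `mine` in place, B leaves it untouched).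
import Mathlib
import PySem

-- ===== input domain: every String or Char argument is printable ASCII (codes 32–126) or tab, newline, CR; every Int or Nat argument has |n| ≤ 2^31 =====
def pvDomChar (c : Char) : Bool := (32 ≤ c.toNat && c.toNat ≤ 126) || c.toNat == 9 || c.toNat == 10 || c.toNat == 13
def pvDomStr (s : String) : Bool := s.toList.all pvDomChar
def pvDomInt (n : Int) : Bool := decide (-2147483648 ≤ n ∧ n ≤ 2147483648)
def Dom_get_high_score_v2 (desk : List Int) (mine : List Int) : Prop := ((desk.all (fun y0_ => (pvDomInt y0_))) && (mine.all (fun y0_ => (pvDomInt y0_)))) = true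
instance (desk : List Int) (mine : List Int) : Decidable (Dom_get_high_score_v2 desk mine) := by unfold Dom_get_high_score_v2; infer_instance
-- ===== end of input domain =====

-- B sorts the pool once and per desk item takes the first pool element ≥ desk+1 (else the
-- head = minimum) by an early-exit scan with positional pops, instead of A's full scan of the
-- unsorted list per item; equivalence is about the RETURN VALUE only (A empties `mine` in
-- place, B leaves it untouched).

-- ===== PORT A =====
-- the `for item in mine` loop of loop_value, with its break on item == eq_val
def pvLoopValAux (items : List Int) (eq_val : Int) (min_val : Int) (rel_val : Option Int) :
    Int × Option Int :=
  match items with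
  | [] => (min_val, rel_val)
  | item :: rest =>
    if item = eq_val then (min_val, some item)   -- rel_val = item; break
    else
      let rel' : Option Int :=
        if eq_val < item then
          match rel_val with
          | none => some item
          | some r => if item < r then some item else some r
        else rel_val
      let min' := if item < min_val then item else min_val
      pvLoopValAux rest eq_val min' rel'

-- loop_value(mine, num); none = IndexError on mine[0]
def loop_value (mine : List Int) (num : Int) : Option (Int × Int × Option Int) :=
  match mine with
  | [] => none
  | m0 :: _ =>
    let p := pvLoopValAux mine num m0 none
    some (num, p.1, p.2)

-- the `for i in desk` loop of A; none = an exception escaped (mine exhausted)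
def pvGoA (desk : List Int) (mine : List Int) (result : List Int) (score : Int) :
    Option (List Int × Int) :=
  match desk with
  | [] => some (result, score)
  | i :: rest =>
    match loop_value mine (i + 1) with
    | none => none
    | some (_, min_val, rel_val) =>
      match rel_val with
      | some r =>
        match PySem.List.remove? mine r with
        | some mine' => pvGoA rest mine' (result ++ [r]) (score + 1)
        | none => none
      | none =>
        match PySem.List.remove? mine min_val with
        | some mine' => pvGoA rest mine' (result ++ [min_val]) score
        | none => none

def get_high_score_v2 (desk : List Int) (mine : List Int) : List Int × Int :=
  (pvGoA desk mine [] 0).getD ([], 0)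

-- ===== PORT B =====
-- the `while k < len(pool) and pool[k] < target` scan, as structural recursion on pool
def pvFind (pool : List Int) (target : Int) : Nat :=
  match pool with
  | [] => 0
  | v :: rest => if v < target then pvFind rest target + 1 else 0

-- the `for i in desk` loop of B; none = an exception escaped (pool exhausted)
def pvGoB (desk : List Int) (pool : List Int) (result : List Int) (score : Int) :
    Option (List Int × Int) :=
  match desk with
  | [] => some (result, score)
  | i :: rest =>
    let target := i + 1
    let k := pvFind pool target
    if k < pool.length then
      match PySem.List.pop? pool (k : Int) with
      | some (v, pool') => pvGoB rest pool' (result ++ [v]) (score + 1)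
      | none => none
    else
      match PySem.List.pop? pool 0 with
      | some (v, pool') => pvGoB rest pool' (result ++ [v]) score
      | none => none

def get_high_score_v2_alt (desk : List Int) (mine : List Int) : List Int × Int :=
  (pvGoB desk (PySem.List.sorted mine (fun x => x) false) [] 0).getD ([], 0)

-- ===== PRECONDITION & SPEC =====
-- A raises IndexError (mine[0] on the emptied list) exactly when len(desk) > len(mine):
-- each desk item removes one element of mine.
def Pre_get_high_score_v2 (desk : List Int) (mine : List Int) : Prop :=
  desk.length ≤ mine.length
instance (desk : List Int) (mine : List Int) : Decidable (Pre_get_high_score_v2 desk mine) := by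
  unfold Pre_get_high_score_v2; infer_instance

def pvWitness_get_high_score_v2 : List Int × List Int := ([2, 5, 1], [3, 1, 6, 2])

def Spec_get_high_score_v2 (desk : List Int) (mine : List Int) (out : List Int × Int) : Prop :=
  out = get_high_score_v2_alt desk mine
instance (desk : List Int) (mine : List Int) (out : List Int × Int) :
    Decidable (Spec_get_high_score_v2 desk mine out) := by
  unfold Spec_get_high_score_v2; infer_instance

-- ===== CLAIM (what is proved, stated in full; the proofs are below) =====
def Claim_equal_get_high_score_v2 : Prop := ∀ (desk : List Int) (mine : List Int), Dom_get_high_score_v2 desk mine → Pre_get_high_score_v2 desk mine → Spec_get_high_score_v2 desk mine (get_high_score_v2 desk mine)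

-- ===== LEMMAS AND PROOFS =====

-- the rel_val update of loop_value, named for the proofs
def pvRelStep (e : Int) (o : Option Int) (x : Int) : Option Int :=
  if e < x then
    match o with
    | none => some x
    | some r => if x < r then some x else some r
  else o

-- (a) a break happens: the first occurrence of eq_val yields rel_val = eq_val
lemma pvLoopValAux_snd_of_mem (items : List Int) (e mv : Int) (rv : Option Int)
    (h : e ∈ items) : (pvLoopValAux items e mv rv).2 = some e := by
  induction items generalizing mv rv with
  | nil => simp at h
  | cons item rest ih =>
    by_cases h1 : item = e
    · subst h1; simp [pvLoopValAux]
    · have h2 : e ∈ rest := by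
        rcases List.mem_cons.1 h with h | h
        · exact absurd h.symm h1
        · exact h
      simp only [pvLoopValAux, if_neg h1]
      exact ih _ _ h2

-- (b) no break: the loop is a plain pair of folds
lemma pvLoopValAux_of_not_mem (items : List Int) (e : Int) (h : e ∉ items) :
    ∀ (mv : Int) (rv : Option Int),
      pvLoopValAux items e mv rv = (items.foldl min mv, items.foldl (pvRelStep e) rv) := by
  induction items with
  | nil => intro mv rv; simp [pvLoopValAux]
  | cons x rest ih =>
    intro mv rv
    have hx : ¬ x = e := fun hc => h (hc ▸ List.mem_cons_self)
    have he : e ∉ rest := fun hc => h (List.mem_cons_of_mem _ hc)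
    simp only [pvLoopValAux, if_neg hx, List.foldl_cons]
    rw [ih he]
    have h1 : (if x < mv then x else mv) = min mv x := by
      simp only [min_def]; split_ifs <;> omega
    have h2 : (if e < x then
        (match rv with
          | none => some x
          | some r => if x < r then some x else some r) else rv) = pvRelStep e rv x := rfl
    rw [h1, h2]

-- the rel_val fold is min? of the elements > e (plus the accumulator)
lemma foldl_pvRelStep_eq_min? (e : Int) :
    ∀ (items : List Int) (o : Option Int),
      items.foldl (pvRelStep e) o
        = ((match o with | none => ([] : List Int) | some r => [r])
            ++ items.filter (fun x => decide (e < x))).min? := by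
  intro items
  induction items with
  | nil => intro o; cases o <;> simp [List.min?]
  | cons x rest ih =>
    intro o
    simp only [List.foldl_cons, List.filter_cons]
    by_cases hx : e < x
    · cases o with
      | none => rw [ih]; simp [pvRelStep, hx]
      | some r =>
        rw [ih]
        have h1 : pvRelStep e (some r) x = some (min r x) := by
          simp only [pvRelStep, if_pos hx]
          rcases lt_or_ge x r with h | h
          · rw [if_pos h, min_eq_right h.le]
          · rw [if_neg (not_lt.2 h), min_eq_left h]
        rw [h1]
        simp only [hx, decide_true, if_pos]
        show (min r x :: rest.filter _).min? = (r :: x :: rest.filter _).min?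
        simp [List.min?]
    · have h1 : pvRelStep e o x = o := by simp [pvRelStep, hx]
      rw [h1, ih]
      simp [hx]

lemma pvFind_le_length (pool : List Int) (t : Int) : pvFind pool t ≤ pool.length := by
  induction pool with
  | nil => simp [pvFind]
  | cons v rest ih => simp only [pvFind, List.length_cons]; split_ifs <;> omega

lemma pvFind_getElem_lt (pool : List Int) (t : Int) :
    ∀ j (hj : j < pool.length), j < pvFind pool t → pool[j] < t := by
  induction pool with
  | nil => intro j hj; simp at hj
  | cons v rest ih =>
    intro j hj hlt
    simp only [pvFind] at hlt
    by_cases hv : v < t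
    · rw [if_pos hv] at hlt
      cases j with
      | zero => simpa using hv
      | succ j =>
        rw [List.getElem_cons_succ]
        exact ih j (by simpa using hj) (by omega)
    · rw [if_neg hv] at hlt; omega

lemma pvFind_getElem_ge (pool : List Int) (t : Int) :
    ∀ (k : Nat) (hk : k < pool.length), k = pvFind pool t → t ≤ pool[k] := by
  induction pool with
  | nil => intro k hk; simp at hk
  | cons v rest ih =>
    intro k hk hkeq
    by_cases hv : v < t
    · rw [show pvFind (v :: rest) t = pvFind rest t + 1 from by simp [pvFind, hv]] at hkeq
      cases k with
      | zero => omega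
      | succ k =>
        rw [List.getElem_cons_succ]
        exact ih k (by simpa using hk) (by omega)
    · rw [show pvFind (v :: rest) t = 0 from by simp [pvFind, hv]] at hkeq
      cases k with
      | zero => simpa using not_lt.1 hv
      | succ k => omega

-- erasing the value at index k = eraseIdx k, when no earlier entry carries that value
lemma erase_eq_eraseIdx_of_first (pool : List Int) :
    ∀ (k : Nat) (hk : k < pool.length),
      (∀ j (hj : j < pool.length), j < k → pool[j] ≠ pool[k]'hk) →
      pool.erase (pool[k]'hk) = pool.eraseIdx k := by
  induction pool with
  | nil => intro k hk; simp at hk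
  | cons v rest ih =>
    intro k hk hfirst
    cases k with
    | zero => simp
    | succ k =>
      have hne : v ≠ (v :: rest)[k + 1]'hk := hfirst 0 (by omega) (by omega)
      rw [List.erase_cons_tail (by simpa using hne), List.eraseIdx_cons_succ]
      rw [List.getElem_cons_succ] at hne ⊢
      rw [ih k (by simpa using hk)
        (fun j hj hjk => by
          have := hfirst (j + 1) (by simpa using hj) (by omega)
          simpa using this)]

-- main simulation: A's loop over the raw list ≡ B's loop over any sorted rearrangement
lemma pvGoA_eq_pvGoB (desk : List Int) :
    ∀ (mine pool result : List Int) (score : Int),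
      pool.Perm mine → pool.Pairwise (· ≤ ·) → desk.length ≤ mine.length →
      pvGoA desk mine result score = pvGoB desk pool result score := by
  induction desk with
  | nil => intro mine pool res s _ _ _; simp [pvGoA, pvGoB]
  | cons i rest ih =>
    intro mine pool res s hperm hsort hlen
    cases mine with
    | nil => simp at hlen
    | cons m0 mt =>
    have hplen : pool.length = mt.length + 1 := by simpa using hperm.length_eq
    by_cases hk : pvFind pool (i + 1) < pool.length
    · -- a match exists: both sides pick v, the smallest element ≥ i+1
      obtain ⟨v, hv⟩ : ∃ v, pool[pvFind pool (i + 1)]'hk = v := ⟨_, rfl⟩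
      have hvt : i + 1 ≤ v := hv ▸ pvFind_getElem_ge pool (i + 1) _ hk rfl
      have hvmem : v ∈ pool := hv ▸ List.getElem_mem hk
      have hvmine : v ∈ m0 :: mt := hperm.mem_iff.1 hvmem
      have hmin : ∀ x ∈ pool, i + 1 ≤ x → v ≤ x := by
        intro x hx hxt
        obtain ⟨j, hj, hjx⟩ := List.getElem_of_mem hx
        rcases lt_trichotomy j (pvFind pool (i + 1)) with hlt | heq | hgt
        · have := pvFind_getElem_lt pool (i + 1) j hj hlt; omega
        · subst heq; rw [← hjx, ← hv]
        · have hp := List.pairwise_iff_getElem.1 hsort _ j hk hj hgt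
          rw [← hjx, ← hv]; exact hp
      have hrel2 : (pvLoopValAux (m0 :: mt) (i + 1) m0 none).2 = some v := by
        by_cases htm : (i + 1) ∈ m0 :: mt
        · have hveq : v = i + 1 := by
            have := hmin (i + 1) (hperm.mem_iff.2 htm) le_rfl
            omega
          rw [pvLoopValAux_snd_of_mem _ _ _ _ htm, hveq]
        · have hvne : v ≠ i + 1 := fun hc => htm (hc ▸ hvmine)
          rw [pvLoopValAux_of_not_mem _ _ htm m0 none]
          rw [show ((m0 :: mt).foldl min m0, (m0 :: mt).foldl (pvRelStep (i + 1)) none).2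
              = (m0 :: mt).foldl (pvRelStep (i + 1)) none from rfl]
          rw [foldl_pvRelStep_eq_min?]
          apply List.min?_eq_some_iff.2
          constructor
          · simp only [List.nil_append]
            exact List.mem_filter.2 ⟨hvmine, by simp; omega⟩
          · intro b hb
            simp only [List.nil_append, List.mem_filter, decide_eq_true_eq] at hb
            exact hmin b (hperm.mem_iff.2 hb.1) (by omega)
      have hrm : PySem.List.remove? (m0 :: mt) v = some ((m0 :: mt).erase v) :=
        PySem.List.remove?_eq_some_erase _ _ hvmine
      have hpop : PySem.List.pop? pool (pvFind pool (i + 1) : Int)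
          = some (v, pool.eraseIdx (pvFind pool (i + 1))) := by
        rw [PySem.List.pop?_natCast pool _ hk, hv]
      have heidx : pool.eraseIdx (pvFind pool (i + 1)) = pool.erase v := by
        rw [← hv]
        refine (erase_eq_eraseIdx_of_first pool _ hk (fun j hj hjk => ?_)).symm
        have h1 := pvFind_getElem_lt pool (i + 1) j hj hjk
        have h2 : i + 1 ≤ pool[pvFind pool (i + 1)]'hk := hv ▸ hvt
        omega
      simp only [pvGoA, loop_value, pvGoB]
      rw [hrel2, if_pos hk, hpop]
      simp only []
      rw [hrm]
      simp only []
      refine ih _ _ _ _ (heidx ▸ hperm.erase v)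
        (List.Pairwise.sublist (List.eraseIdx_sublist pool _) hsort) ?_
      rw [List.length_erase_of_mem hvmine]
      simp only [List.length_cons] at hlen ⊢
      omega
    · -- no element ≥ i+1: both sides pick the minimum
      have hkeq : pvFind pool (i + 1) = pool.length := by
        have := pvFind_le_length pool (i + 1); omega
      have hall : ∀ x ∈ pool, x < i + 1 := by
        intro x hx
        obtain ⟨j, hj, hjx⟩ := List.getElem_of_mem hx
        rw [← hjx]; exact pvFind_getElem_lt pool (i + 1) j hj (by omega)
      have hallm : ∀ x ∈ m0 :: mt, x < i + 1 := fun x hx => hall x (hperm.mem_iff.2 hx)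
      have htm : (i + 1) ∉ m0 :: mt := fun hc => absurd (hallm _ hc) (lt_irrefl _)
      have hrel : pvLoopValAux (m0 :: mt) (i + 1) m0 none = ((m0 :: mt).foldl min m0, none) := by
        rw [pvLoopValAux_of_not_mem _ _ htm m0 none]
        congr 1
        rw [foldl_pvRelStep_eq_min?]
        simp only [List.nil_append]
        rw [List.min?_eq_none_iff, List.filter_eq_nil_iff]
        intro x hx
        have := hallm x hx
        simp; omega
      cases pool with
      | nil => simp at hplen
      | cons p0 pt =>
      have hmn_mem : (m0 :: mt).foldl min m0 ∈ m0 :: mt := by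
        rcases PySem.List.foldl_min_mem (m0 :: mt) m0 with h | h
        · rw [h]; exact List.mem_cons_self
        · exact h
      have hmn_le : ∀ y ∈ m0 :: mt, (m0 :: mt).foldl min m0 ≤ y :=
        (PySem.List.foldl_min_le (m0 :: mt) m0).2
      have hhead_le : ∀ y ∈ p0 :: pt, p0 ≤ y := by
        intro y hy
        rcases List.mem_cons.1 hy with h | h
        · exact h ▸ le_rfl
        · exact (List.pairwise_cons.1 hsort).1 y h
      have hmp : (m0 :: mt).foldl min m0 = p0 := le_antisymm
        (hmn_le p0 (hperm.mem_iff.1 List.mem_cons_self))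
        (hhead_le _ (hperm.mem_iff.2 hmn_mem))
      have hrm : PySem.List.remove? (m0 :: mt) ((m0 :: mt).foldl min m0)
          = some ((m0 :: mt).erase ((m0 :: mt).foldl min m0)) :=
        PySem.List.remove?_eq_some_erase _ _ hmn_mem
      simp only [pvGoA, loop_value, pvGoB]
      rw [hrel, if_neg hk, PySem.List.pop?_zero_cons]
      simp only []
      rw [hrm]
      simp only []
      rw [hmp]
      refine ih _ _ _ _ (List.erase_cons_head p0 pt ▸ hperm.erase p0)
        (List.Pairwise.sublist (List.sublist_cons_self p0 pt) hsort) ?_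
      rw [List.length_erase_of_mem (hmp ▸ hmn_mem)]
      simp only [List.length_cons] at hlen ⊢
      omega

-- ===== VERDICT (by name: the statement is the Claim_ definition above) =====
theorem get_high_score_v2_spec : Claim_equal_get_high_score_v2 := by
  intro desk mine _ hpre
  unfold Spec_get_high_score_v2 get_high_score_v2 get_high_score_v2_alt
  rw [pvGoA_eq_pvGoB desk mine (PySem.List.sorted mine (fun x => x) false) [] 0
    (PySem.List.sorted_perm mine (fun x => x) false)
    (PySem.List.sorted_pairwise mine (fun x => x)) hpre]
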